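-- pv_equiv track=rewrite | github.com/shufl9dka/fm-index | util/string.py | lexicographic_cnt_less
-- ===== SOURCE A (Python) =====
-- from collections import Counter
-- from typing import SupportsIndex
--
-- def lexicographic_cnt_less(s: SupportsIndex):
--     counts = Counter(s)
--     result = {}
--
--     total = 0
--     for char in sorted(counts):
--         result[char] = total
--         total += counts[char]
--
--     return result
-- ===== SOURCE B (Python) =====
-- def lexicographic_cnt_less(s):
--     result = {}
--     for i, char in enumerate(sorted(s)):
--         if char not in result:
--             result[char] = i
--     return result
-- ===== Notes on version B (the rewrite author's own statement) =====
-- stated objective: simpler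
-- what changed: Instead of building a Counter, sorting its distinct keys and accumulating a running prefix-sum of counts, B sorts the whole input once and records, for each character, its first-occurrence index in the sorted sequence (which equals the number of strictly smaller characters).
import Mathlib
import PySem

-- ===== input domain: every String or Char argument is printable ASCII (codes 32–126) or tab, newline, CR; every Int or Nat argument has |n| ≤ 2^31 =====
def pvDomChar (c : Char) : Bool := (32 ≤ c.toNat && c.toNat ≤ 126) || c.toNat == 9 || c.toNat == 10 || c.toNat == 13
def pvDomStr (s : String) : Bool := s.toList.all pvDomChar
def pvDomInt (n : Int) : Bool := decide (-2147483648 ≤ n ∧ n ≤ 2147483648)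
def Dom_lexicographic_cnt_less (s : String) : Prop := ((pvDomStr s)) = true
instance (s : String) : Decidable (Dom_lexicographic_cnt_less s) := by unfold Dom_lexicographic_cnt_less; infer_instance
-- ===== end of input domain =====

-- B replaces A's Counter + prefix-sum over sorted distinct keys by a single pass over the
-- fully sorted string recording each character's first-occurrence index (objective: simpler).

-- ===== PORT A =====
def lexicographic_cnt_less (s : String) : List (String × Int) :=
  let counts := PySem.Dict.counter s.toList
  let res := (PySem.List.sorted counts.keys (fun c => c) false).foldl
    (fun (st : PySem.Dict String Int × Int) char =>
      (st.1.insert char.toString st.2, st.2 + counts.getD char 0))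
    (PySem.Dict.empty, 0)
  res.1.items

-- ===== PORT B =====
def lexicographic_cnt_less_alt (s : String) : List (String × Int) :=
  ((PySem.List.enumerate (PySem.List.sorted s.toList (fun c => c) false) 0).foldl
    (fun (result : PySem.Dict String Int) ic =>
      if result.contains ic.2.toString then result else result.insert ic.2.toString ic.1)
    PySem.Dict.empty).items

-- ===== PRECONDITION & SPEC =====
def Spec_lexicographic_cnt_less (s : String) (out : List (String × Int)) : Prop := out = lexicographic_cnt_less_alt s
instance (s : String) (out : List (String × Int)) : Decidable (Spec_lexicographic_cnt_less s out) := by unfold Spec_lexicographic_cnt_less; infer_instance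

-- ===== CLAIM (what is proved, stated in full; the proofs are below) =====
def Claim_equal_lexicographic_cnt_less : Prop := ∀ (s : String), Dom_lexicographic_cnt_less s → Spec_lexicographic_cnt_less s (lexicographic_cnt_less s)

-- ===== LEMMAS AND PROOFS =====

theorem charToString_inj {a b : Char} (h : a.toString = b.toString) : a = b := by
  have := congrArg String.toList h
  simpa [Char.toString] using this

-- count of chars < c in xs, as the sum of the multiplicities of the distinct keys < c
theorem countP_lt_eq_sum (xs ks : List Char) (c : Char)
    (hnd : ks.Nodup) (hsub : ∀ x ∈ xs, x ∈ ks) :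
    ((xs.countP (fun x => decide (x < c)) : Int))
      = ((ks.filter (fun k => decide (k < c))).map (fun k => (xs.count k : Int))).sum := by
  induction xs with
  | nil => simp
  | cons x t ih =>
    have hx : x ∈ ks := hsub x (by simp)
    have hsub' : ∀ y ∈ t, y ∈ ks := fun y hy => hsub y (by simp [hy])
    have ihs := ih hsub'
    have hcount : ∀ k : Char, ((x :: t).count k : Int) = (t.count k : Int) + (if k = x then 1 else 0) := by
      intro k
      by_cases h : k = x
      · simp [h]
      · have h2 : ¬ x = k := fun hh => h hh.symm
        simp [h, h2]
    have hmap : ((ks.filter (fun k => decide (k < c))).map (fun k => ((x :: t).count k : Int))).sum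
        = ((ks.filter (fun k => decide (k < c))).map (fun k => (t.count k : Int))).sum
          + ((ks.filter (fun k => decide (k < c))).map (fun k => (if k = x then (1:Int) else 0))).sum := by
      induction ks.filter (fun k => decide (k < c)) with
      | nil => simp
      | cons a l ihl => simp [hcount a, ihl]; ring
    have hsum_count : ∀ (l : List Char),
        ((l.map (fun k => (if k = x then (1:Int) else 0))).sum) = (l.count x : Int) := by
      intro l
      induction l with
      | nil => simp
      | cons a l ihl =>
        by_cases h : a = x
        · subst h; simp [ihl]; ring
        · have h2 : ¬ x = a := fun hh => h hh.symm
          simp [h, ihl]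
    have hone : ((ks.filter (fun k => decide (k < c))).map (fun k => (if k = x then (1:Int) else 0))).sum
        = if x < c then (1:Int) else 0 := by
      rw [hsum_count]
      by_cases h : x < c
      · rw [List.count_filter (by simpa using h), List.count_eq_one_of_mem hnd hx]
        simp [h]
      · have hnm : x ∉ ks.filter (fun k => decide (k < c)) := by
          simp [List.mem_filter, h]
        rw [List.count_eq_zero.mpr hnm]
        simp [h]
    rw [hmap, ← ihs, hone, List.countP_cons]
    by_cases h : x < c
    · simp [h]
    · simp [h]

-- A's loop: over a strictly increasing key list it appends (key, count-of-smaller) pairs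
theorem foldA (xs : List Char) : ∀ (ks : List Char) (d : PySem.Dict String Int) (total : Int),
    ks.Pairwise (· < ·) →
    (∀ c ∈ ks, ((xs.countP (fun x => decide (x < c)) : Int))
        = total + ((ks.filter (fun k => decide (k < c))).map (fun k => (xs.count k : Int))).sum) →
    (∀ c ∈ ks, d.contains c.toString = false) →
    ((ks.foldl (fun (st : PySem.Dict String Int × Int) char =>
        (st.1.insert char.toString st.2, st.2 + (PySem.Dict.counter xs).getD char 0))
      (d, total)).1.items)
      = d.items ++ ks.map (fun c => (c.toString, (xs.countP (fun x => decide (x < c)) : Int))) := by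
  intro ks
  induction ks with
  | nil => intro d total _ _ _; simp
  | cons c rest ih =>
    intro d total hp htot hcon
    have hlt : ∀ x ∈ rest, c < x := (List.pairwise_cons.mp hp).1
    have hp' : rest.Pairwise (· < ·) := (List.pairwise_cons.mp hp).2
    have hfilc : (c :: rest).filter (fun k => decide (k < c)) = [] := by
      rw [List.filter_eq_nil_iff]
      intro a ha
      rcases List.mem_cons.mp ha with ha | ha
      · simp [ha]
      · simpa using not_lt_of_gt (hlt _ ha)
    have hvc : ((xs.countP (fun x => decide (x < c)) : Int)) = total := by
      have := htot c (by simp)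
      rw [hfilc] at this; simpa using this
    have hstep : ∀ c' ∈ rest,
        ((xs.countP (fun x => decide (x < c')) : Int))
          = (total + (PySem.Dict.counter xs).getD c 0)
            + ((rest.filter (fun k => decide (k < c'))).map (fun k => (xs.count k : Int))).sum := by
      intro c' hc'
      have h1 := htot c' (by simp [hc'])
      have hcc' : c < c' := hlt c' hc'
      rw [List.filter_cons_of_pos (by simpa using hcc')] at h1
      rw [h1, PySem.Dict.getD_counter]
      simp; ring
    have hcon' : ∀ c' ∈ rest, (d.insert c.toString total).contains c'.toString = false := by
      intro c' hc'
      have hne : (c'.toString == c.toString) = false := by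
        simp only [beq_eq_false_iff_ne, ne_eq]
        exact fun h => absurd (charToString_inj h) (ne_of_gt (hlt c' hc'))
      rw [PySem.Dict.contains_insert, hne, hcon c' (by simp [hc'])]
      simp
    have hrec := ih (d.insert c.toString total) (total + (PySem.Dict.counter xs).getD c 0) hp' hstep hcon'
    simp only [List.foldl_cons]
    rw [hrec, PySem.Dict.items_insert_of_not_contains _ _ (hcon c (by simp))]
    simp [hvc]

-- B's loop skips an already-seen run of characters
theorem foldB_skip : ∀ (g : List Char) (n : Int) (d : PySem.Dict String Int),
    (∀ x ∈ g, d.contains x.toString = true) →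
    ((PySem.List.enumerate g n).foldl
      (fun (result : PySem.Dict String Int) ic =>
        if result.contains ic.2.toString then result else result.insert ic.2.toString ic.1) d) = d := by
  intro g
  induction g with
  | nil => intro n d _; simp [PySem.List.enumerate_nil]
  | cons x t ih =>
    intro n d h
    rw [PySem.List.enumerate_cons]
    simp only [List.foldl_cons, h x (by simp)]
    exact ih (n + 1) d (fun y hy => h y (by simp [hy]))

-- B's loop: over a sorted list t it appends (key, n + count-of-smaller-in-t) for each
-- distinct key, in the order of the strictly increasing key list ks
theorem foldB : ∀ (m : Nat) (t : List Char), t.length ≤ m → t.Pairwise (· ≤ ·) →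
    ∀ (ks : List Char), ks.Pairwise (· < ·) → (∀ x, x ∈ ks ↔ x ∈ t) →
    ∀ (n : Int) (d : PySem.Dict String Int), (∀ x ∈ t, d.contains x.toString = false) →
    ((PySem.List.enumerate t n).foldl
      (fun (result : PySem.Dict String Int) ic =>
        if result.contains ic.2.toString then result else result.insert ic.2.toString ic.1) d).items
      = d.items ++ ks.map (fun c => (c.toString, n + (t.countP (fun x => decide (x < c)) : Int))) := by
  intro m
  induction m with
  | zero =>
    intro t ht _ ks _ hmem n d _
    have ht0 : t = [] := List.eq_nil_of_length_eq_zero (Nat.le_zero.mp ht)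
    subst ht0
    have hks : ks = [] := by
      cases ks with
      | nil => rfl
      | cons a l => exact absurd ((hmem a).mp (by simp)) (by simp)
    subst hks; simp [PySem.List.enumerate_nil]
  | succ m ih =>
    intro t htlen hts ks hksp hmem n d hcon
    cases t with
    | nil =>
      have hks : ks = [] := by
        cases ks with
        | nil => rfl
        | cons a l => exact absurd ((hmem a).mp (by simp)) (by simp)
      subst hks; simp [PySem.List.enumerate_nil]
    | cons c rest =>
      have hle : ∀ x ∈ rest, c ≤ x := (List.pairwise_cons.mp hts).1
      have hrs : rest.Pairwise (· ≤ ·) := (List.pairwise_cons.mp hts).2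
      have hgr : rest.takeWhile (fun x => x == c) ++ rest.dropWhile (fun x => x == c) = rest :=
        List.takeWhile_append_dropWhile
      set g := rest.takeWhile (fun x => x == c) with hg
      set r := rest.dropWhile (fun x => x == c) with hr
      have hgc : ∀ x ∈ g, x = c := by
        intro x hx
        have := List.mem_takeWhile_imp hx
        simpa using this
      have hrrest : ∀ x ∈ r, x ∈ rest := by
        intro x hx; rw [← hgr]; exact List.mem_append_right _ hx
      have hrp : r.Pairwise (· ≤ ·) := hrs.sublist (List.dropWhile_sublist _)
      have hrgt : ∀ x ∈ r, c < x := by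
        intro x hx
        cases hd : r with
        | nil => rw [hd] at hx; simp at hx
        | cons h0 tr =>
          have hh0ne : h0 ≠ c := by
            have := List.head?_dropWhile_not (fun x => x == c) rest
            rw [← hr, hd] at this; simpa using this
          have hch0 : c < h0 :=
            lt_of_le_of_ne (hle h0 (hrrest h0 (by rw [hd]; simp))) (Ne.symm hh0ne)
          rw [hd] at hx
          rcases List.mem_cons.mp hx with hx0 | hx1
          · rw [hx0]; exact hch0
          · have : h0 ≤ x := by
              rw [hd] at hrp
              exact (List.pairwise_cons.mp hrp).1 x hx1
            exact lt_of_lt_of_le hch0 this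
      -- decompose ks = c :: ks'
      have hcks : c ∈ ks := (hmem c).mpr (by simp)
      obtain ⟨k, ks', hksd⟩ : ∃ k ks', ks = k :: ks' := by
        cases ks with
        | nil => simp at hcks
        | cons k ks' => exact ⟨k, ks', rfl⟩
      subst hksd
      have hkc : k = c := by
        have hk_t : k ∈ c :: rest := (hmem k).mp (by simp)
        have hck : c ≤ k := by
          rcases List.mem_cons.mp hk_t with h | h
          · rw [h]
          · exact hle k h
        rcases List.mem_cons.mp hcks with h | h
        · exact h.symm
        · exact absurd hck (not_le_of_gt ((List.pairwise_cons.mp hksp).1 c h))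
      subst hkc
      have hksp' : ks'.Pairwise (· < ·) := (List.pairwise_cons.mp hksp).2
      have hklt : ∀ x ∈ ks', k < x := (List.pairwise_cons.mp hksp).1
      have hmem' : ∀ x, x ∈ ks' ↔ x ∈ r := by
        intro x
        constructor
        · intro hx
          have hxk : k < x := hklt x hx
          have hxt : x ∈ k :: rest := (hmem x).mp (by simp [hx])
          rcases List.mem_cons.mp hxt with h | h
          · exact absurd h (ne_of_gt hxk)
          · rw [← hgr] at h
            rcases List.mem_append.mp h with h | h
            · exact absurd (hgc x h) (ne_of_gt hxk)
            · exact h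
        · intro hx
          have hxk : k < x := hrgt x hx
          have hxks : x ∈ k :: ks' := (hmem x).mpr (by simp [hrrest x hx])
          rcases List.mem_cons.mp hxks with h | h
          · exact absurd h (ne_of_gt hxk)
          · exact h
      -- run the fold
      have hrlen : r.length ≤ m := by
        have h1 : g.length + r.length = rest.length := by
          rw [← List.length_append, hgr]
        have h2 : rest.length + 1 ≤ m + 1 := by simpa using htlen
        omega
      rw [← hgr, PySem.List.enumerate_cons, PySem.List.enumerate_append]
      simp only [List.foldl_cons, List.foldl_append]
      rw [hcon k (by simp)]
      simp only [Bool.false_eq_true, if_false]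
      have hskip := foldB_skip g (n + 1) (d.insert k.toString n) (by
        intro x hx
        rw [hgc x hx, PySem.Dict.contains_insert]
        simp)
      rw [hskip]
      have hcon' : ∀ x ∈ r, (d.insert k.toString n).contains x.toString = false := by
        intro x hx
        have hne : (x.toString == k.toString) = false := by
          simp only [beq_eq_false_iff_ne, ne_eq]
          exact fun h => absurd (charToString_inj h) (ne_of_gt (hrgt x hx))
        rw [PySem.Dict.contains_insert, hne, hcon x (by simp [hrrest x hx])]
        simp
      have hrec := ih r hrlen hrp ks' hksp' hmem' (n + 1 + g.length) (d.insert k.toString n) hcon'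
      rw [hrec, PySem.Dict.items_insert_of_not_contains _ _ (hcon k (by simp))]
      -- identify the values
      have hcount_k : (k :: (g ++ r)).countP (fun x => decide (x < k)) = 0 := by
        rw [List.countP_eq_zero]
        intro a ha
        rcases List.mem_cons.mp ha with h | h
        · simp [h]
        · rcases List.mem_append.mp h with h | h
          · simp [hgc a h]
          · simpa using not_lt_of_gt (hrgt a h)
      have hcount_c' : ∀ c' ∈ ks',
          ((k :: (g ++ r)).countP (fun x => decide (x < c')) : Int)
            = 1 + g.length + (r.countP (fun x => decide (x < c')) : Int) := by
        intro c' hc'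
        have hkc' : k < c' := hklt c' hc'
        rw [List.countP_cons, List.countP_append]
        have hgcount : g.countP (fun x => decide (x < c')) = g.length := by
          rw [List.countP_eq_length]
          intro a ha
          simp [hgc a ha, hkc']
        rw [hgcount]
        simp [hkc']
        ring
      have hmap : ks'.map (fun c => ((c.toString : String),
              n + 1 + (g.length : Int) + ((r.countP (fun x => decide (x < c))) : Int)))
          = ks'.map (fun c => (c.toString, n + (((k :: (g ++ r)).countP (fun x => decide (x < c))) : Int))) := by
        apply List.map_congr_left
        intro c' hc'
        refine congrArg (fun z => (c'.toString, z)) ?_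
        rw [hcount_c' c' hc']; ring
      rw [hmap]
      simp [hcount_k]

-- ===== VERDICT (by name: the statement is the Claim_ definition above) =====
theorem lexicographic_cnt_less_spec : Claim_equal_lexicographic_cnt_less := by
  intro s _
  unfold Spec_lexicographic_cnt_less lexicographic_cnt_less lexicographic_cnt_less_alt
  simp only [PySem.Dict.keys_counter]
  set xs := s.toList with hxs
  set ks := PySem.List.sorted (PySem.Set.ofList xs) (fun c => c) false with hks
  set t := PySem.List.sorted xs (fun c => c) false with ht
  have hksp : ks.Pairwise (· < ·) := PySem.List.sorted_ofList_pairwise_lt xs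
  have hknd : ks.Nodup := hksp.imp ne_of_lt
  have hsub : ∀ x ∈ xs, x ∈ ks := by
    intro x hx
    rw [hks, PySem.List.mem_sorted, PySem.Set.mem_ofList]
    exact hx
  have hA := foldA xs ks PySem.Dict.empty 0 hksp
    (by
      intro c hc
      rw [countP_lt_eq_sum xs ks c hknd hsub]
      ring)
    (by intro c _; exact PySem.Dict.contains_empty _)
  have htperm : t.Perm xs := PySem.List.sorted_perm xs (fun c => c) false
  have htp : t.Pairwise (· ≤ ·) := PySem.List.sorted_pairwise xs (fun c => c)
  have hmem : ∀ x, x ∈ ks ↔ x ∈ t := by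
    intro x
    rw [hks, ht]
    simp [PySem.List.mem_sorted, PySem.Set.mem_ofList]
  have hB := foldB t.length t (le_refl _) htp ks hksp hmem 0 PySem.Dict.empty
    (by intro x _; exact PySem.Dict.contains_empty _)
  rw [hA, hB]
  simp [PySem.Dict.empty]
  intro a _
  exact (htperm.countP_eq _).symm
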